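-- pv_equiv track=rewrite | github.com/sc-likes-to-code/ML---5th-SEM | Assignment 3/senti_anal2.py | analyze_review
-- ===== SOURCE A (Python) =====
-- positive_words = {"good", "great", "amazing", "enjoyable", "nice", "fantastic", "love", "excellent", "wonderful", "best"}
--
-- negative_words = {"bad", "worst", "boring", "terrible", "awful", "poor", "hate", "2nd grade", "waste", "disappointing"}
--
-- pronouns = {"i", "me", "my", "you", "your"}
--
-- def analyze_review(review):
--     review_lower = review.lower()
--     words = review_lower.split()
--
--     pos_count = 0
--     neg_count = 0
--     pronoun_count = 0
--     contains_no = 1 if "no" in words else 0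
--     exclamation_count = review.count("!")
--     total_words = len(words)
--
--     for word in words:
--         word_clean = word.strip(".,!?")
--         if word_clean in positive_words:
--             pos_count += 1
--         elif word_clean in negative_words:
--             neg_count += 1
--         if word_clean in pronouns:
--             pronoun_count += 1
--
--     return [pos_count, neg_count, contains_no, pronoun_count, exclamation_count, total_words]
-- ===== SOURCE B (Python) =====
-- positive_words = {"good", "great", "amazing", "enjoyable", "nice", "fantastic", "love", "excellent", "wonderful", "best"}
--
-- negative_words = {"bad", "worst", "boring", "terrible", "awful", "poor", "hate", "2nd grade", "waste", "disappointing"}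
--
-- pronouns = {"i", "me", "my", "you", "your"}
--
-- def analyze_review(review):
--     words = review.lower().split()
--     # one pass: frequency table of cleaned words
--     freq = {}
--     for w in words:
--         wc = w.strip(".,!?")
--         freq[wc] = freq.get(wc, 0) + 1
--     # then iterate over the fixed vocabularies, not over the review
--     pos_count = sum(freq.get(w, 0) for w in positive_words)
--     neg_count = sum(freq.get(w, 0) for w in negative_words)
--     pronoun_count = sum(freq.get(w, 0) for w in pronouns)
--     return [pos_count, neg_count, 1 if "no" in words else 0,
--             pronoun_count, review.count("!"), len(words)]
-- ===== Notes on version B (the rewrite author's own statement) =====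
-- stated objective: alternative
-- what changed: B builds a frequency table of cleaned words in one pass and then computes each sentiment/pronoun count by summing lookups over the fixed vocabulary sets, instead of A's per-word if/elif membership-test counting loop.
import Mathlib
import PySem

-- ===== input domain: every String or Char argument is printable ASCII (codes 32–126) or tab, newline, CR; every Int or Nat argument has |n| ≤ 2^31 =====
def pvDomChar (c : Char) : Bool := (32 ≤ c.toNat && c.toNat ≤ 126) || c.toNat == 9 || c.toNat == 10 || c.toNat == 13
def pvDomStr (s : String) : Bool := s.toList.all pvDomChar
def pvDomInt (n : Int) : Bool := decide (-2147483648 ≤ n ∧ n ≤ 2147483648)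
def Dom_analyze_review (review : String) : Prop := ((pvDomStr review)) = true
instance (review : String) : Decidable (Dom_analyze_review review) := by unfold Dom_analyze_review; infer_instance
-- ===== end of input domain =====

-- B replaces A's per-word if/elif counting loop by a frequency table of cleaned words,
-- then sums lookups over the fixed vocabularies (objective: alternative decomposition).

-- the module-level vocabulary sets (Python set literals; elements distinct)
def positive_words : List String :=
  ["good", "great", "amazing", "enjoyable", "nice", "fantastic", "love", "excellent", "wonderful", "best"]
def negative_words : List String :=
  ["bad", "worst", "boring", "terrible", "awful", "poor", "hate", "2nd grade", "waste", "disappointing"]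
def pronouns : List String := ["i", "me", "my", "you", "your"]

-- ===== PORT A =====
def analyze_review (review : String) : List Int :=
  let words := PySem.Str.split₀ (PySem.Str.lower review)
  let contains_no : Int := if "no" ∈ words then 1 else 0
  let exclamation_count : Int := (PySem.Str.count review "!" : Int)
  let total_words : Int := (words.length : Int)
  let st := words.foldl (fun (acc : Int × Int × Int) word =>
    let word_clean := PySem.Str.stripChars word ".,!?"
    let pos := if word_clean ∈ positive_words then acc.1 + 1
               else acc.1
    let neg := if word_clean ∈ positive_words then acc.2.1
               else if word_clean ∈ negative_words then acc.2.1 + 1 else acc.2.1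
    let pr  := if word_clean ∈ pronouns then acc.2.2 + 1 else acc.2.2
    (pos, neg, pr)) (0, 0, 0)
  [st.1, st.2.1, contains_no, st.2.2, exclamation_count, total_words]

-- ===== PORT B =====
def analyze_review_alt (review : String) : List Int :=
  let words := PySem.Str.split₀ (PySem.Str.lower review)
  let freq := words.foldl (fun (d : PySem.Dict String Int) w =>
    let wc := PySem.Str.stripChars w ".,!?"
    d.insert wc (d.getD wc 0 + 1)) PySem.Dict.empty
  let pos_count := (positive_words.map (fun w => freq.getD w 0)).sum
  let neg_count := (negative_words.map (fun w => freq.getD w 0)).sum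
  let pronoun_count := (pronouns.map (fun w => freq.getD w 0)).sum
  [pos_count, neg_count, (if "no" ∈ words then 1 else 0),
   pronoun_count, (PySem.Str.count review "!" : Int), (words.length : Int)]

-- ===== PRECONDITION & SPEC =====
def Spec_analyze_review (review : String) (out : List Int) : Prop := out = analyze_review_alt review
instance (review : String) (out : List Int) : Decidable (Spec_analyze_review review out) := by unfold Spec_analyze_review; infer_instance

-- ===== CLAIM (what is proved, stated in full; the proofs are below) =====
def Claim_equal_analyze_review : Prop := ∀ (review : String), Dom_analyze_review review → Spec_analyze_review review (analyze_review review)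

-- ===== LEMMAS AND PROOFS =====

-- the two sentiment vocabularies are disjoint, so dropping A's elif is sound
lemma pos_not_neg (w : String) (h : w ∈ positive_words) : w ∉ negative_words := by
  fin_cases h <;> decide

lemma countP_mem_cons (v : String) (rest xs : List String) (hv : v ∉ rest) :
    xs.countP (fun x => decide (x ∈ v :: rest))
      = xs.count v + xs.countP (fun x => decide (x ∈ rest)) := by
  induction xs with
  | nil => simp
  | cons a t iht =>
    simp only [List.countP_cons, List.count_cons, iht]
    by_cases hav : a = v
    · subst hav; simp [hv]; omega
    · by_cases har : a ∈ rest <;> simp [hav, har, List.mem_cons] <;> omega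

-- Σ_{v ∈ vocab} count v xs = countP (· ∈ vocab) xs for a duplicate-free vocabulary
lemma sum_count_eq_countP (vocab xs : List String) (h : vocab.Nodup) :
    (vocab.map (fun v => (xs.count v : Int))).sum = (xs.countP (fun x => decide (x ∈ vocab)) : Int) := by
  induction vocab with
  | nil => simp
  | cons v rest ih =>
    rcases List.nodup_cons.mp h with ⟨hv, hrest⟩
    simp only [List.map_cons, List.sum_cons, ih hrest, countP_mem_cons v rest xs hv]
    push_cast
    ring

-- A's counting loop computes the three countP values over the cleaned words
lemma foldA_eq (ws : List String) (p n pr : Int) :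
    ws.foldl (fun (acc : Int × Int × Int) word =>
      let word_clean := PySem.Str.stripChars word ".,!?"
      let pos := if word_clean ∈ positive_words then acc.1 + 1 else acc.1
      let neg := if word_clean ∈ positive_words then acc.2.1
                 else if word_clean ∈ negative_words then acc.2.1 + 1 else acc.2.1
      let pr' := if word_clean ∈ pronouns then acc.2.2 + 1 else acc.2.2
      (pos, neg, pr')) (p, n, pr)
    = (p + (ws.countP (fun w => decide (PySem.Str.stripChars w ".,!?" ∈ positive_words)) : Int),
       n + (ws.countP (fun w => decide (PySem.Str.stripChars w ".,!?" ∈ negative_words)) : Int),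
       pr + (ws.countP (fun w => decide (PySem.Str.stripChars w ".,!?" ∈ pronouns)) : Int)) := by
  induction ws generalizing p n pr with
  | nil => simp
  | cons w t ih =>
    simp only [List.foldl_cons, List.countP_cons, ih]
    by_cases hp : PySem.Str.stripChars w ".,!?" ∈ positive_words <;>
      by_cases hn : PySem.Str.stripChars w ".,!?" ∈ negative_words <;>
      by_cases hpr : PySem.Str.stripChars w ".,!?" ∈ pronouns <;>
      first
        | exact absurd hn (pos_not_neg _ hp)
        | (simp [hp, hn, hpr, Prod.ext_iff]; try omega)

-- B's frequency dict is Counter of the cleaned words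
lemma freq_eq_counter (ws : List String) :
    ws.foldl (fun (d : PySem.Dict String Int) w =>
        let wc := PySem.Str.stripChars w ".,!?"
        d.insert wc (d.getD wc 0 + 1)) PySem.Dict.empty
      = PySem.Dict.counter (ws.map (fun w => PySem.Str.stripChars w ".,!?")) := by
  rw [← PySem.Dict.foldl_insert_getD_add_one_eq_counter, List.foldl_map]

lemma vocab_sum (vocab ws : List String) (h : vocab.Nodup) :
    (vocab.map (fun w =>
        (PySem.Dict.counter (ws.map (fun w => PySem.Str.stripChars w ".,!?"))).getD w 0)).sum
      = (ws.countP (fun w => decide (PySem.Str.stripChars w ".,!?" ∈ vocab)) : Int) := by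
  have : ∀ w, (PySem.Dict.counter (ws.map (fun w => PySem.Str.stripChars w ".,!?"))).getD w 0
      = ((ws.map (fun w => PySem.Str.stripChars w ".,!?")).count w : Int) := by
    intro w; rw [PySem.Dict.getD_counter]
  simp only [this, sum_count_eq_countP _ _ h, List.countP_map]
  rfl

-- ===== VERDICT (by name: the statement is the Claim_ definition above) =====
theorem analyze_review_spec : Claim_equal_analyze_review := by
  intro review _
  unfold Spec_analyze_review analyze_review analyze_review_alt
  simp only [freq_eq_counter, foldA_eq,
    vocab_sum positive_words _ (by decide),
    vocab_sum negative_words _ (by decide),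
    vocab_sum pronouns _ (by decide)]
  norm_num
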